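-- pv_equiv track=rewrite | github.com/BrentLagesse/CytoCV | yeastweb/accounts/views/login.py | _summarize_password_errors
-- ===== SOURCE A (Python) =====
-- def _summarize_password_errors(messages: list[str]) -> str:
--     """Combine password validation messages into a single sentence."""
--     flags: set[str] = set()
--     extras: list[str] = []
--     for message in messages:
--         lower_msg = message.lower()
--         if "too short" in lower_msg or "at least" in lower_msg:
--             flags.add("length")
--         elif "too common" in lower_msg or "common password" in lower_msg:
--             flags.add("common")
--         elif "entirely numeric" in lower_msg:
--             flags.add("numeric")
--         else:
--             extras.append(message.rstrip("."))
--
--     parts: list[str] = []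
--     if "length" in flags:
--         parts.append("be at least 8 characters")
--     if "common" in flags:
--         parts.append("not be a common password")
--     if "numeric" in flags:
--         parts.append("not be entirely numeric")
--
--     summary = ""
--     if parts:
--         if len(parts) == 1:
--             summary = f"Password must {parts[0]}."
--         elif len(parts) == 2:
--             summary = f"Password must {parts[0]} and {parts[1]}."
--         else:
--             summary = f"Password must {parts[0]}, {parts[1]}, and {parts[2]}."
--
--     if extras:
--         extra = extras[0]
--         if summary:
--             summary = summary.rstrip(".") + f" and {extra}."
--         else:
--             summary = f"{extra}."
--
--     return summary or "Password is not strong enough."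
-- ===== SOURCE B (Python) =====
-- KEYS_LENGTH = ("too short", "at least")
-- KEYS_COMMON = ("too common", "common password")
-- KEYS_NUMERIC = ("entirely numeric",)
--
--
-- def _hit(message, keys):
--     low = message.lower()
--     return any(k in low for k in keys)
--
--
-- def _oxford(parts):
--     if len(parts) == 1:
--         return parts[0]
--     if len(parts) == 2:
--         return parts[0] + " and " + parts[1]
--     return ", ".join(parts[:-1]) + ", and " + parts[-1]
--
--
-- def _summarize_password_errors(messages):
--     # staged declarative passes: each flag is an independent scan, no loop state
--     candidates = [
--         ("be at least 8 characters",
--          any(_hit(m, KEYS_LENGTH) for m in messages)),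
--         ("not be a common password",
--          any(_hit(m, KEYS_COMMON) and not _hit(m, KEYS_LENGTH) for m in messages)),
--         ("not be entirely numeric",
--          any(_hit(m, KEYS_NUMERIC) and not _hit(m, KEYS_COMMON)
--              and not _hit(m, KEYS_LENGTH) for m in messages)),
--     ]
--     parts = [phrase for phrase, present in candidates if present]
--     extra = next((m.rstrip(".") for m in messages
--                   if not (_hit(m, KEYS_LENGTH) or _hit(m, KEYS_COMMON)
--                           or _hit(m, KEYS_NUMERIC))), None)
--     pieces = ["Password must " + _oxford(parts)] if parts else []
--     if extra is not None:
--         pieces.append(extra)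
--     return " and ".join(pieces) + "." if pieces else "Password is not strong enough."
-- ===== Notes on version B (the rewrite author's own statement) =====
-- stated objective: alternative
-- what changed: Replaces A's single stateful classification loop (a flags set and extras list mutated per message with an elif cascade, then a len(parts)==1/2/3 sentence cascade) by staged declarative passes: each flag is an independent any()-scan over the messages, the extra is a next() over a generator, and the sentence is a generic Oxford-comma join of the pieces.
import Mathlib
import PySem

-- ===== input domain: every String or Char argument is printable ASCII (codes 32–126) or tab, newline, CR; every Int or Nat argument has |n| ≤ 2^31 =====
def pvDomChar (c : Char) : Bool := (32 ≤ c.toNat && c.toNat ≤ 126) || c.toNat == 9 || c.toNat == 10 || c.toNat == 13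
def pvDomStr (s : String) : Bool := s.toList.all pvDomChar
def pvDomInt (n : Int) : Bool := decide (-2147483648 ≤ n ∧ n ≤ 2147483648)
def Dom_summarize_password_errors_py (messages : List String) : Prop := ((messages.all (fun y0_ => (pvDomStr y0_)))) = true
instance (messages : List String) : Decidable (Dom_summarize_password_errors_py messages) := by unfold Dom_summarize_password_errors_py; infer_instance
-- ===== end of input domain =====

-- B replaces A's single stateful classification loop and hard-coded sentence cascade by
-- independent declarative scans per flag plus a generic Oxford-comma join (alternative decomposition, not faster).

-- exact port of Python s.rstrip(".") (right-only strip with a char set); used by both Pythons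
def pvRstripDot (s : String) : String :=
  String.ofList ((s.toList.reverse.dropWhile (fun c => c == '.')).reverse)

-- ===== PORT A =====
-- the for-loop body of A
def pvStepA (st : PySem.Set String × List String) (message : String) :
    PySem.Set String × List String :=
  let lowerMsg := PySem.Str.lower message
  if PySem.Str.isIn "too short" lowerMsg || PySem.Str.isIn "at least" lowerMsg then
    (PySem.Set.add st.1 "length", st.2)
  else if PySem.Str.isIn "too common" lowerMsg || PySem.Str.isIn "common password" lowerMsg then
    (PySem.Set.add st.1 "common", st.2)
  else if PySem.Str.isIn "entirely numeric" lowerMsg then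
    (PySem.Set.add st.1 "numeric", st.2)
  else (st.1, st.2 ++ [pvRstripDot message])

-- A's code after the loop
def pvFinishA (st : PySem.Set String × List String) : String :=
  let flags := st.1
  let extras := st.2
  let parts : List String :=
    (if PySem.Set.contains flags "length" then ["be at least 8 characters"] else []) ++
    (if PySem.Set.contains flags "common" then ["not be a common password"] else []) ++
    (if PySem.Set.contains flags "numeric" then ["not be entirely numeric"] else [])
  let summary : String :=
    if parts.length == 0 then ""
    else if parts.length == 1 then
      "Password must " ++ parts.headD "" ++ "."
    else if parts.length == 2 then
      "Password must " ++ parts.headD "" ++ " and " ++ (parts.drop 1).headD "" ++ "."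
    else
      "Password must " ++ parts.headD "" ++ ", " ++ (parts.drop 1).headD "" ++ ", and " ++
        (parts.drop 2).headD "" ++ "."
  let summary : String :=
    if extras.length == 0 then summary
    else
      let extra := extras.headD ""
      if summary == "" then extra ++ "."
      else pvRstripDot summary ++ " and " ++ extra ++ "."
  if summary == "" then "Password is not strong enough." else summary

def summarize_password_errors_py (messages : List String) : String :=
  pvFinishA (messages.foldl pvStepA (PySem.Set.empty, []))

-- ===== PORT B =====
def pvKeysLength : List String := ["too short", "at least"]
def pvKeysCommon : List String := ["too common", "common password"]
def pvKeysNumeric : List String := ["entirely numeric"]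

def pvHit (message : String) (keys : List String) : Bool :=
  let low := PySem.Str.lower message
  keys.any (fun k => PySem.Str.isIn k low)

def pvOxford (parts : List String) : String :=
  if parts.length == 1 then (PySem.List.pyGet? parts 0).getD ""
  else if parts.length == 2 then
    (PySem.List.pyGet? parts 0).getD "" ++ " and " ++ (PySem.List.pyGet? parts 1).getD ""
  else
    PySem.Str.join ", " (PySem.List.slice parts none (some (-1))) ++ ", and " ++
      (PySem.List.pyGet? parts (-1)).getD ""

def summarize_password_errors_py_alt (messages : List String) : String :=
  let candidates : List (String × Bool) :=
    [("be at least 8 characters",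
      messages.any (fun m => pvHit m pvKeysLength)),
     ("not be a common password",
      messages.any (fun m => pvHit m pvKeysCommon && !pvHit m pvKeysLength)),
     ("not be entirely numeric",
      messages.any (fun m => pvHit m pvKeysNumeric && !pvHit m pvKeysCommon && !pvHit m pvKeysLength))]
  let parts : List String := candidates.filterMap (fun p => if p.2 then some p.1 else none)
  let extra : Option String :=
    (messages.find? (fun m =>
      !(pvHit m pvKeysLength || pvHit m pvKeysCommon || pvHit m pvKeysNumeric))).map pvRstripDot
  let pieces : List String :=
    (if parts.length == 0 then [] else ["Password must " ++ pvOxford parts]) ++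
    (match extra with | some e => [e] | none => [])
  if pieces.length == 0 then "Password is not strong enough."
  else PySem.Str.join " and " pieces ++ "."

-- ===== PRECONDITION & SPEC =====
def Spec_summarize_password_errors_py (messages : List String) (out : String) : Prop := out = summarize_password_errors_py_alt messages
instance (messages : List String) (out : String) : Decidable (Spec_summarize_password_errors_py messages out) := by unfold Spec_summarize_password_errors_py; infer_instance

-- ===== CLAIM =====
def Claim_equal_summarize_password_errors_py : Prop := ∀ (messages : List String), Dom_summarize_password_errors_py messages → Spec_summarize_password_errors_py messages (summarize_password_errors_py messages)

-- ===== LEMMAS AND PROOFS =====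

theorem pv_contains_add (s : PySem.Set String) (x y : String) :
    PySem.Set.contains (PySem.Set.add s x) y = (PySem.Set.contains s y || y == x) := by
  rw [PySem.Set.add_eq_ite]
  by_cases h : x ∈ s <;> by_cases hy : y = x <;>
    simp_all [PySem.Set.contains_eq_listContains, List.contains_append]

theorem pv_head?_filter {α : Type} (p : α → Bool) (l : List α) :
    (l.filter p).head? = l.find? p := by
  induction l with
  | nil => rfl
  | cons a t ih => by_cases h : p a <;> simp [h, ih]

-- characterization of A's loop in B's declarative terms
theorem pv_foldA (messages : List String) (st : PySem.Set String × List String) :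
    PySem.Set.contains (messages.foldl pvStepA st).1 "length"
      = (PySem.Set.contains st.1 "length" || messages.any (fun m => pvHit m pvKeysLength)) ∧
    PySem.Set.contains (messages.foldl pvStepA st).1 "common"
      = (PySem.Set.contains st.1 "common"
          || messages.any (fun m => pvHit m pvKeysCommon && !pvHit m pvKeysLength)) ∧
    PySem.Set.contains (messages.foldl pvStepA st).1 "numeric"
      = (PySem.Set.contains st.1 "numeric"
          || messages.any (fun m => pvHit m pvKeysNumeric && !pvHit m pvKeysCommon && !pvHit m pvKeysLength)) ∧
    (messages.foldl pvStepA st).2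
      = st.2 ++ (messages.filter (fun m =>
          !(pvHit m pvKeysLength || pvHit m pvKeysCommon || pvHit m pvKeysNumeric))).map pvRstripDot := by
  induction messages generalizing st with
  | nil => simp
  | cons m ms ih =>
    have hL : (PySem.Str.isIn "too short" (PySem.Str.lower m)
        || PySem.Str.isIn "at least" (PySem.Str.lower m)) = pvHit m pvKeysLength := by
      simp [pvHit, pvKeysLength]
    have hC : (PySem.Str.isIn "too common" (PySem.Str.lower m)
        || PySem.Str.isIn "common password" (PySem.Str.lower m)) = pvHit m pvKeysCommon := by
      simp [pvHit, pvKeysCommon]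
    have hN : PySem.Str.isIn "entirely numeric" (PySem.Str.lower m) = pvHit m pvKeysNumeric := by
      simp [pvHit, pvKeysNumeric]
    simp only [List.foldl_cons, List.any_cons, List.filter_cons]
    cases hl : pvHit m pvKeysLength <;> cases hc : pvHit m pvKeysCommon <;>
      cases hn : pvHit m pvKeysNumeric <;>
      · obtain ⟨i1, i2, i3, i4⟩ := ih (pvStepA st m)
        simp only [pvStepA, hL, hC, hN, hl, hc, hn, if_true, if_false, Bool.false_or,
          Bool.true_or, Bool.and_false, Bool.and_true, Bool.true_and, Bool.false_and,
          Bool.not_true, Bool.not_false, Bool.or_true, Bool.or_false] at i1 i2 i3 i4 ⊢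
        refine ⟨?_, ?_, ?_, ?_⟩ <;>
          simp_all [pv_contains_add, List.append_assoc]

-- ===== VERDICT =====
theorem summarize_password_errors_py_spec : Claim_equal_summarize_password_errors_py := by
  intro messages _
  obtain ⟨h1, h2, h3, h4⟩ := pv_foldA messages (PySem.Set.empty, [])
  have hemp : ∀ x : String, PySem.Set.contains PySem.Set.empty x = false := fun _ => rfl
  unfold Spec_summarize_password_errors_py summarize_password_errors_py
    summarize_password_errors_py_alt pvFinishA
  simp only [h1, h2, h3, h4, hemp, Bool.false_or, List.nil_append, ← pv_head?_filter]
  cases hb1 : messages.any (fun m => pvHit m pvKeysLength) <;>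
  cases hb2 : messages.any (fun m => pvHit m pvKeysCommon && !pvHit m pvKeysLength) <;>
  cases hb3 : messages.any (fun m => pvHit m pvKeysNumeric && !pvHit m pvKeysCommon && !pvHit m pvKeysLength) <;>
  cases hx : messages.filter (fun m =>
      !(pvHit m pvKeysLength || pvHit m pvKeysCommon || pvHit m pvKeysNumeric)) <;>
  simp only [List.map_nil, List.map_cons, List.head?_cons, List.head?_nil, List.headD] <;>
  first
    | decide
    | (rw [← String.toList_inj]
       simp [pvOxford, PySem.Str.join, PySem.List.pyGet?, PySem.List.pyIdx?,
         PySem.List.slice, pvRstripDot, PySem.Chars.join_cons_cons, PySem.Chars.join_singleton])
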